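-- pv_equiv track=rewrite | github.com/DHA-Tappuri/ddsm_driver | firmware/main.py | get_i2c_channel
-- ===== SOURCE A (Python) =====
-- def get_i2c_channel(sda_pin, scl_pin):
--     # I2C pin map
--     i2c_pins = {
--         0: {"sda": [0, 4, 8], "scl": [1, 5, 9]},
--         1: {"sda": [2, 6, 10], "scl": [3, 7, 11]},
--     }
--
--     # check pins
--     for channel, pins in i2c_pins.items():
--         if sda_pin in pins["sda"] and scl_pin in pins["scl"]:
--             return channel
--
--     # invalid pins
--     return None
-- ===== SOURCE B (Python) =====
-- def get_i2c_channel(sda_pin, scl_pin):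
--     # reverse maps: each pin -> its owning channel
--     sda_to_ch = {0: 0, 4: 0, 8: 0, 2: 1, 6: 1, 10: 1}
--     scl_to_ch = {1: 0, 5: 0, 9: 0, 3: 1, 7: 1, 11: 1}
--     c_sda = sda_to_ch.get(sda_pin)
--     c_scl = scl_to_ch.get(scl_pin)
--     if c_sda is not None and c_sda == c_scl:
--         return c_sda
--     return None
-- ===== Notes on version B (the rewrite author's own statement) =====
-- stated objective: idiomatic
-- what changed: Replaces the per-channel loop with nested membership tests by two precomputed pin->channel reverse maps and an agreement check between the two looked-up channels.
import Mathlib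
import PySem

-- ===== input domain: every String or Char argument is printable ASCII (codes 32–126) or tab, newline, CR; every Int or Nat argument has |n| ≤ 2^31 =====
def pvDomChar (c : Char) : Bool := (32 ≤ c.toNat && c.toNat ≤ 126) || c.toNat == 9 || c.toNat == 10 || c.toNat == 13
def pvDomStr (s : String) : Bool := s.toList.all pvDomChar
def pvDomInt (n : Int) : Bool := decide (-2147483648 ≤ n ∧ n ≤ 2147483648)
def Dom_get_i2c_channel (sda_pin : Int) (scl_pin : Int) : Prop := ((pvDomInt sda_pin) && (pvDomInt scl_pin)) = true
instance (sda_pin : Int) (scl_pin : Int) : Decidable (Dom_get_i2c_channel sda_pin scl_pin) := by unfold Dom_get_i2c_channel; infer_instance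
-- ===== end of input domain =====

-- B replaces A's per-channel loop with two pin->channel reverse maps and an agreement check (idiomatic).

-- ===== PORT A =====
-- the dict i2c_pins as its item list: (channel, (sda list, scl list))
def pvI2cPins : List (Int × List Int × List Int) :=
  [(0, ([0, 4, 8], [1, 5, 9])), (1, ([2, 6, 10], [3, 7, 11]))]

-- the 'for channel, pins in i2c_pins.items()' loop with early return
def pvScanChannels (items : List (Int × List Int × List Int)) (sda_pin scl_pin : Int) : Option Int :=
  match items with
  | [] => none
  | (channel, sdas, scls) :: rest =>
      if sda_pin ∈ sdas ∧ scl_pin ∈ scls then some channel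
      else pvScanChannels rest sda_pin scl_pin

def get_i2c_channel (sda_pin : Int) (scl_pin : Int) : Option Int :=
  pvScanChannels pvI2cPins sda_pin scl_pin

-- ===== PORT B =====
def pvSdaToCh : PySem.Dict Int Int := PySem.Dict.ofList [(0, 0), (4, 0), (8, 0), (2, 1), (6, 1), (10, 1)]
def pvSclToCh : PySem.Dict Int Int := PySem.Dict.ofList [(1, 0), (5, 0), (9, 0), (3, 1), (7, 1), (11, 1)]

def get_i2c_channel_alt (sda_pin : Int) (scl_pin : Int) : Option Int :=
  let c_sda := PySem.Dict.get? pvSdaToCh sda_pin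
  let c_scl := PySem.Dict.get? pvSclToCh scl_pin
  match c_sda with
  | some a => if c_scl = some a then some a else none
  | none => none

-- ===== PRECONDITION & SPEC =====
def Spec_get_i2c_channel (sda_pin : Int) (scl_pin : Int) (out : Option Int) : Prop := out = get_i2c_channel_alt sda_pin scl_pin
instance (sda_pin : Int) (scl_pin : Int) (out : Option Int) : Decidable (Spec_get_i2c_channel sda_pin scl_pin out) := by unfold Spec_get_i2c_channel; infer_instance

-- ===== CLAIM (what is proved, stated in full; the proofs are below) =====
def Claim_equal_get_i2c_channel : Prop := ∀ (sda_pin : Int) (scl_pin : Int), Dom_get_i2c_channel sda_pin scl_pin → Spec_get_i2c_channel sda_pin scl_pin (get_i2c_channel sda_pin scl_pin)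

-- ===== LEMMAS AND PROOFS =====

-- ===== VERDICT (by name: the statement is the Claim_ definition above) =====
set_option maxHeartbeats 2000000 in
theorem get_i2c_channel_spec : Claim_equal_get_i2c_channel := by
  intro sda scl _
  unfold Spec_get_i2c_channel get_i2c_channel get_i2c_channel_alt pvScanChannels pvI2cPins
  have hs : PySem.Dict.get? pvSdaToCh sda
      = PySem.Dict.get? (PySem.Dict.mk [(0, 0), (4, 0), (8, 0), (2, 1), (6, 1), (10, 1)]) sda := rfl
  have hc : PySem.Dict.get? pvSclToCh scl
      = PySem.Dict.get? (PySem.Dict.mk [(1, 0), (5, 0), (9, 0), (3, 1), (7, 1), (11, 1)]) scl := rfl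
  have hemp : ∀ x : Int, PySem.Dict.get? (PySem.Dict.mk ([] : List (Int × Int))) x = none :=
    fun _ => rfl
  simp only [hs, hc, PySem.Dict.get?_mk_cons, hemp, List.mem_cons, List.not_mem_nil, or_false,
    beq_iff_eq]
  split_ifs <;> (try simp_all [pvScanChannels]) <;> (try omega) <;> (split_ifs <;> first | rfl | omega)
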